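-- pv_equiv track=rewrite | github.com/lin/lin.github.io | public/cp/cf/835/e.py | get_aver
-- ===== SOURCE A (Python) =====
-- def get_aver(arr):
--     res = 0
--     count = 0
--     for num in arr[::-1]:
--         if num == 0:
--             count += 1
--         else:
--             res += count
--     return res
-- ===== SOURCE B (Python) =====
-- def get_aver(arr):
--     zero_positions = [i for i, x in enumerate(arr) if x == 0]
--     return sum(i - j for j, i in enumerate(zero_positions))
-- ===== Notes on version B (the rewrite author's own statement) =====
-- stated objective: alternative
-- what changed: Instead of A's reversed-scan with running zero and pair counters, B collects the indices of the zeros and sums i - j over the j-th zero at index i (the number of nonzeros left of that zero), giving the same pair count by index arithmetic.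
import Mathlib
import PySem

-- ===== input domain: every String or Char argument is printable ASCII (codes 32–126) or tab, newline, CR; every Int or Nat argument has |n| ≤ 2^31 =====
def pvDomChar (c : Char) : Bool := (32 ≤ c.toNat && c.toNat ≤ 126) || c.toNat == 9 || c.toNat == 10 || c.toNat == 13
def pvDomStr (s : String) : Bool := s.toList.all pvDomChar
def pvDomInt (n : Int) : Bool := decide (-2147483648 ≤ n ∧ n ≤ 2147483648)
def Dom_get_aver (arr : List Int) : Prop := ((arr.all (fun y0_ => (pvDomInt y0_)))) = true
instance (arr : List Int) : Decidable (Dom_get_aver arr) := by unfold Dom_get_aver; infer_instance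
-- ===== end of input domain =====

-- B replaces A's reversed scan with counters by index arithmetic over the list of
-- zero positions: the j-th zero at index i contributes i - j (objective: alternative).

-- ===== PORT A =====
-- step of A's loop: state (res, count); count += 1 on zero, res += count on nonzero
def pvStepA (st : Int × Int) (num : Int) : Int × Int :=
  if num = 0 then (st.1, st.2 + 1) else (st.1 + st.2, st.2)

def get_aver (arr : List Int) : Int :=
  -- arr[::-1] is PySem.List.slice? arr none none (-1), always some for step -1
  (((PySem.List.slice? arr none none (-1)).getD []).foldl pvStepA (0, 0)).1

-- ===== PORT B =====
def get_aver_alt (arr : List Int) : Int :=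
  -- zero_positions = [i for i, x in enumerate(arr) if x == 0]
  let zero_positions : List Int :=
    ((PySem.List.enumerate arr).filter (fun p => p.2 == 0)).map (fun p => p.1)
  -- sum(i - j for j, i in enumerate(zero_positions))
  ((PySem.List.enumerate zero_positions).map (fun p => p.2 - p.1)).sum

-- ===== PRECONDITION & SPEC =====
def Spec_get_aver (arr : List Int) (out : Int) : Prop := out = get_aver_alt arr
instance (arr : List Int) (out : Int) : Decidable (Spec_get_aver arr out) := by unfold Spec_get_aver; infer_instance

-- ===== CLAIM (what is proved, stated in full; the proofs are below) =====
def Claim_equal_get_aver : Prop := ∀ (arr : List Int), Dom_get_aver arr → Spec_get_aver arr (get_aver arr)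

-- ===== LEMMAS AND PROOFS =====

-- number of zeros in a list, as an Int
def pvZeros : List Int → Int
  | [] => 0
  | x :: t => (if x = 0 then 1 else 0) + pvZeros t

-- common specification: each nonzero contributes the zeros to its right
def pvSpecVal : List Int → Int
  | [] => 0
  | x :: t => if x = 0 then pvSpecVal t else pvSpecVal t + pvZeros t

-- ---- A-side ----

theorem stepA_snd (l : List Int) : ∀ r c : Int, (l.foldl pvStepA (r, c)).2 = c + pvZeros l := by
  induction l with
  | nil => intro r c; simp [pvZeros]
  | cons x t ih =>
      intro r c
      by_cases hx : x = 0 <;> simp [pvStepA, hx, pvZeros, ih] <;> ring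

theorem zeros_append (l m : List Int) : pvZeros (l ++ m) = pvZeros l + pvZeros m := by
  induction l with
  | nil => simp [pvZeros]
  | cons x t ih => simp [pvZeros, ih]; ring

theorem zeros_reverse (l : List Int) : pvZeros l.reverse = pvZeros l := by
  induction l with
  | nil => rfl
  | cons x t ih => simp [pvZeros, List.reverse_cons, zeros_append, ih]; ring

theorem get_aver_eq_spec (arr : List Int) : get_aver arr = pvSpecVal arr := by
  induction arr with
  | nil => rfl
  | cons x t ih =>
      have h : get_aver (x :: t) = (pvStepA (t.reverse.foldl pvStepA (0, 0)) x).1 := by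
        simp [get_aver, PySem.List.slice?_none_none_neg_one, List.reverse_cons,
          List.foldl_append]
      have hsnd : (t.reverse.foldl pvStepA (0, 0)).2 = pvZeros t := by
        rw [stepA_snd, zeros_reverse]; ring
      have hfst : (t.reverse.foldl pvStepA (0, 0)).1 = get_aver t := by
        simp [get_aver, PySem.List.slice?_none_none_neg_one]
      rw [h]
      by_cases hx : x = 0
      · simp only [pvStepA, if_pos hx]
        rw [hfst, ih]
        simp [pvSpecVal, hx]
      · simp only [pvStepA, if_neg hx]
        rw [hfst, hsnd, ih]
        simp [pvSpecVal, hx]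

-- ---- B-side ----

-- proof-side structural form of the zero-position list starting at offset s
def pvF : List Int → Int → List Int
  | [], _ => []
  | x :: t, s => if x = 0 then s :: pvF t (s + 1) else pvF t (s + 1)

-- proof-side structural form of sum(i - j for j, i in enumerate(zs, j0))
def pvG : List Int → Int → Int
  | [], _ => 0
  | i :: r, j => (i - j) + pvG r (j + 1)

theorem F_eq (t : List Int) : ∀ s : Int,
    ((PySem.List.enumerate t s).filter (fun p => p.2 == 0)).map (fun p => p.1) = pvF t s := by
  induction t with
  | nil => intro s; simp [PySem.List.enumerate_nil, pvF]
  | cons x r ih =>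
      intro s
      by_cases hx : x = 0 <;>
        simp [PySem.List.enumerate_cons, List.filter, hx, pvF, ih]

theorem G_eq (zs : List Int) : ∀ j : Int,
    ((PySem.List.enumerate zs j).map (fun p => p.2 - p.1)).sum = pvG zs j := by
  induction zs with
  | nil => intro j; simp [PySem.List.enumerate_nil, pvG]
  | cons i r ih =>
      intro j
      simp [PySem.List.enumerate_cons, pvG, ih]

theorem G_F (t : List Int) : ∀ s j : Int,
    pvG (pvF t s) j = pvSpecVal t + pvZeros t * (s - j) := by
  induction t with
  | nil => intro s j; simp [pvF, pvG, pvSpecVal, pvZeros]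
  | cons x r ih =>
      intro s j
      by_cases hx : x = 0
      · subst hx
        simp [pvF, pvG, ih, pvSpecVal, pvZeros]
        ring
      · simp [pvF, hx, ih, pvSpecVal, pvZeros]
        ring

theorem get_aver_alt_eq_spec (arr : List Int) : get_aver_alt arr = pvSpecVal arr := by
  show ((PySem.List.enumerate
      (((PySem.List.enumerate arr).filter (fun p => p.2 == 0)).map (fun p => p.1))
      0).map (fun p => p.2 - p.1)).sum = pvSpecVal arr
  rw [F_eq, G_eq, G_F]
  ring

-- ===== VERDICT (by name: the statement is the Claim_ definition above) =====
theorem get_aver_spec : Claim_equal_get_aver := by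
  intro arr _
  unfold Spec_get_aver
  rw [get_aver_eq_spec, get_aver_alt_eq_spec]
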